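-- pv_equiv track=rewrite | github.com/yonatan-h/competitive-programming | week9-after-admission/Difference Between Ones and Zeros in Row and Column.py | count
-- ===== SOURCE A (Python) =====
-- def count(matrix):
--     height = len(matrix)
--     width = len(matrix[0])
--
--     row_counts = [ [0,0] for _ in range(height)]
--     col_counts = [[0,0] for _ in range(width)]
--
--
--     for row_num in range(len(matrix)):
--         for col_num in range(len(matrix[0])):
--
--             value = matrix[row_num][col_num]
--             if value == 0 or value == 1:
--                 row_counts[row_num][value] += 1
--                 col_counts[col_num][value] += 1
--
--     return [row_counts, col_counts]
-- ===== SOURCE B (Python) =====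
-- def count(matrix):
--     width = len(matrix[0])
--     row_counts = [[sum(1 for v in row[:width] if v == 0),
--                    sum(1 for v in row[:width] if v == 1)] for row in matrix]
--     col_counts = [[sum(1 for row in matrix if row[c] == 0),
--                    sum(1 for row in matrix if row[c] == 1)] for c in range(width)]
--     return [row_counts, col_counts]
-- ===== Notes on version B (the rewrite author's own statement) =====
-- stated objective: alternative
-- what changed: Replaces the single interleaved nested loop that increments shared row/column counters with two independent passes: row counts by a per-row scan of the first width entries, column counts by a per-column scan over the rows.
import Mathlib
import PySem

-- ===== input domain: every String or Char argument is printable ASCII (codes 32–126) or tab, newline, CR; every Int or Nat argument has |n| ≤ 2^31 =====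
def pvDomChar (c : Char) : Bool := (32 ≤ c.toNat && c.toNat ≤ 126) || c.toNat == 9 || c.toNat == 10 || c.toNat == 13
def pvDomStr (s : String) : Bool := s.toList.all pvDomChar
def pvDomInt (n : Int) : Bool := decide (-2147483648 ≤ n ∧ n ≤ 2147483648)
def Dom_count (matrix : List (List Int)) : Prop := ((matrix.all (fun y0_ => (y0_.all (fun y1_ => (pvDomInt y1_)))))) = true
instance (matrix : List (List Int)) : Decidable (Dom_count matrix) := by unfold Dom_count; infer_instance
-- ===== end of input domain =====

-- B replaces A's single interleaved nested loop (shared mutable row/col counters) with two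
-- independent passes: per-row counting, then per-column counting; alternative decomposition, same cost.

-- ===== PORT A =====
def count (matrix : List (List Int)) : List (List (List Int)) :=
  let height := matrix.length
  let width := (matrix.headD []).length
  let row_counts := List.replicate height ([0, 0] : List Int)
  let col_counts := List.replicate width ([0, 0] : List Int)
  let s := (List.range height).foldl (fun (s : List (List Int) × List (List Int)) row_num =>
    (List.range width).foldl (fun (s : List (List Int) × List (List Int)) col_num =>
      let value := (matrix.getD row_num []).getD col_num 0
      if value = 0 ∨ value = 1 then
        (s.1.modify row_num (fun r => r.modify value.toNat (· + 1)),
         s.2.modify col_num (fun r => r.modify value.toNat (· + 1)))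
      else s) s) (row_counts, col_counts)
  [s.1, s.2]

-- ===== PORT B =====
def count_alt (matrix : List (List Int)) : List (List (List Int)) :=
  let width := (matrix.headD []).length
  let row_counts := matrix.map (fun row =>
    [((row.take width).countP (fun v => v == 0) : Int),
     ((row.take width).countP (fun v => v == 1) : Int)])
  let col_counts := (List.range width).map (fun c =>
    [((matrix.countP (fun row => row.getD c 0 == 0)) : Int),
     ((matrix.countP (fun row => row.getD c 0 == 1)) : Int)])
  [row_counts, col_counts]

-- ===== PRECONDITION & SPEC =====
-- Pre_ excludes exactly the inputs where A raises IndexError: the empty matrix (matrix[0])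
-- and ragged matrices with a row shorter than the first row (matrix[row][col] out of range).
def Pre_count (matrix : List (List Int)) : Prop :=
  matrix ≠ [] ∧ ∀ row ∈ matrix, (matrix.headD []).length ≤ row.length
instance (matrix : List (List Int)) : Decidable (Pre_count matrix) := by unfold Pre_count; infer_instance

def pvWitness_count : List (List Int) := [[0, 1, 7], [2, 0, 1]]

def Spec_count (matrix : List (List Int)) (out : List (List (List Int))) : Prop := out = count_alt matrix
instance (matrix : List (List Int)) (out : List (List (List Int))) : Decidable (Spec_count matrix out) := by unfold Spec_count; infer_instance

-- ===== CLAIM (what is proved, stated in full; the proofs are below) =====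
def Claim_equal_count : Prop := ∀ (matrix : List (List Int)), Dom_count matrix → Pre_count matrix → Spec_count matrix (count matrix)

-- ===== LEMMAS AND PROOFS =====

-- the effect of one matrix entry on a 2-element counter [zeros, ones]
def bumpE (r : List Int) (cn : Nat) (e : List Int) : List Int :=
  if r.getD cn 0 = 0 ∨ r.getD cn 0 = 1 then e.modify (r.getD cn 0).toNat (· + 1) else e

def innerCC (w : Nat) (r : List Int) (cc : List (List Int)) : List (List Int) :=
  (List.range w).foldl (fun cc cn => cc.modify cn (bumpE r cn)) cc

lemma modify_modify' {α : Type} (l : List α) (i : Nat) (f g : α → α) :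
    (l.modify i f).modify i g = l.modify i (fun e => g (f e)) := by
  apply List.ext_getElem
  · simp
  · intro j h1 h2
    simp only [List.getElem_modify]
    split <;> simp [*]

lemma foldl_pair {α β γ : Type} (f : α → γ → α) (g : β → γ → β) :
    ∀ (xs : List γ) (a : α) (b : β),
    xs.foldl (fun s x => (f s.1 x, g s.2 x)) (a, b) = (xs.foldl f a, xs.foldl g b) := by
  intro xs
  induction xs with
  | nil => intro a b; rfl
  | cons x xs ih => intro a b; simpa using ih (f a x) (g b x)

lemma foldl_modify_same {α γ : Type} (g : γ → α → α) (i : Nat) :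
    ∀ (cs : List γ) (l : List α),
    cs.foldl (fun l c => l.modify i (g c)) l = l.modify i (fun e => cs.foldl (fun e c => g c e) e) := by
  intro cs
  induction cs with
  | nil => intro l; simp only [List.foldl_nil]; exact (List.modify_id _ _).symm
  | cons c cs ih =>
      intro l
      rw [List.foldl_cons, ih, modify_modify']
      rfl

lemma foldl_shift {α : Type} (h : Nat → α → α) :
    ∀ (cs : List Nat) (y : α) (xs : List α),
    cs.foldl (fun l c => l.modify (c + 1) (h c)) (y :: xs)
      = y :: cs.foldl (fun l c => l.modify c (h c)) xs := by
  intro cs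
  induction cs with
  | nil => intro y xs; rfl
  | cons c cs ih =>
      intro y xs
      rw [List.foldl_cons, List.foldl_cons,
        show (y :: xs).modify (c + 1) (h c) = y :: xs.modify c (h c) from by simp [List.modify]]
      exact ih y _

lemma foldl_range_modify {α : Type} :
    ∀ (l : List α) (g : Nat → α → α),
    (List.range l.length).foldl (fun l c => l.modify c (g c)) l = l.mapIdx g := by
  intro l
  induction l with
  | nil => intro g; rfl
  | cons x xs ih =>
      intro g
      rw [List.length_cons, List.range_succ_eq_map, List.foldl_cons, List.foldl_map]
      rw [show (x :: xs).modify 0 (g 0) = g 0 x :: xs from by simp [List.modify]]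
      simp only [Nat.succ_eq_add_one]
      rw [foldl_shift (fun c => g (c + 1)), ih (fun c => g (c + 1)), List.mapIdx_cons]

lemma mapIdx_map_range {α β : Type} (g : Nat → α → β) (F : Nat → α) (n : Nat) :
    ((List.range n).map F).mapIdx g = (List.range n).map (fun i => g i (F i)) := by
  apply List.ext_getElem
  · simp
  · intro i h1 h2; simp [List.getElem_mapIdx]

lemma mapIdx_replicate {α β : Type} (g : Nat → α → β) (n : Nat) (c : α) :
    (List.replicate n c).mapIdx g = (List.range n).map (fun i => g i c) := by
  apply List.ext_getElem
  · simp
  · intro i h1 h2; simp [List.getElem_mapIdx]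

lemma replicate_eq_map_range {α : Type} (n : Nat) (c : α) :
    List.replicate n c = (List.range n).map (fun _ => c) := by
  apply List.ext_getElem
  · simp
  · intro i h1 h2; simp

lemma inner_entry (r : List Int) :
    ∀ (cs : List Nat) (a b : Int),
    cs.foldl (fun e c => bumpE r c e) [a, b]
      = [a + (cs.countP (fun c => r.getD c 0 == 0) : Int),
         b + (cs.countP (fun c => r.getD c 0 == 1) : Int)] := by
  intro cs
  induction cs with
  | nil => intro a b; simp
  | cons c cs ih =>
      intro a b
      rw [List.foldl_cons]
      simp only [List.countP_cons]
      unfold bumpE at ih ⊢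
      generalize r.getD c 0 = v
      by_cases h0 : v = 0
      · subst h0
        rw [show (if (0 : Int) = 0 ∨ (0 : Int) = 1 then
              [a, b].modify (0 : Int).toNat (· + 1) else [a, b]) = [a + 1, b] from by
            norm_num [List.modify]]
        rw [ih]
        norm_num
        ring
      · by_cases h1 : v = 1
        · subst h1
          rw [show (if (1 : Int) = 0 ∨ (1 : Int) = 1 then
                [a, b].modify (1 : Int).toNat (· + 1) else [a, b]) = [a, b + 1] from by
              norm_num [List.modify]]
          rw [ih]
          norm_num
          ring
        · rw [if_neg (by simp [h0, h1]), ih]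
          simp [h0, h1]

lemma take_eq_map_range (r : List Int) (w : Nat) (hw : w ≤ r.length) :
    r.take w = (List.range w).map (fun i => r.getD i 0) := by
  apply List.ext_getElem
  · simp [Nat.min_eq_left hw]
  · intro i h1 h2
    have hi : i < r.length := by
      have : i < w := by simpa [Nat.min_eq_left hw] using h1
      omega
    simp [List.getElem_take, List.getElem?_eq_getElem hi]

lemma foldl_range_getD {α β : Type} (F : α → β → α) (d : β) :
    ∀ (l : List β) (s : α),
    (List.range l.length).foldl (fun s i => F s (l.getD i d)) s = l.foldl F s := by
  intro l
  induction l with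
  | nil => intro s; rfl
  | cons x xs ih =>
      intro s
      rw [List.length_cons, List.range_succ_eq_map, List.foldl_cons, List.foldl_map]
      simp only [Nat.succ_eq_add_one, List.getD_cons_succ, List.getD_cons_zero, List.foldl_cons]
      exact ih (F s x)

lemma map_range_getD {α β : Type} (F : β → α) (d : β) :
    ∀ (l : List β),
    (List.range l.length).map (fun i => F (l.getD i d)) = l.map F := by
  intro l
  induction l with
  | nil => rfl
  | cons x xs ih =>
      rw [List.length_cons, List.range_succ_eq_map, List.map_cons, List.map_map,
        List.getD_cons_zero]
      congr 1

lemma ccMain (w : Nat) :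
    ∀ (rows : List (List Int)) (f0 f1 : Nat → Int),
    rows.foldl (fun cc r => innerCC w r cc) ((List.range w).map (fun c => [f0 c, f1 c]))
      = (List.range w).map (fun c =>
          [f0 c + (rows.countP (fun r => r.getD c 0 == 0) : Int),
           f1 c + (rows.countP (fun r => r.getD c 0 == 1) : Int)]) := by
  intro rows
  induction rows with
  | nil => intro f0 f1; simp
  | cons r rows ih =>
      intro f0 f1
      rw [List.foldl_cons]
      have hstep : innerCC w r ((List.range w).map fun c => [f0 c, f1 c])
          = (List.range w).map (fun c =>
              [f0 c + if r.getD c 0 == 0 then 1 else 0,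
               f1 c + if r.getD c 0 == 1 then 1 else 0]) := by
        unfold innerCC
        have hl : ((List.range w).map fun c => [f0 c, f1 c]).length = w := by simp
        have hfold := foldl_range_modify ((List.range w).map fun c => [f0 c, f1 c]) (bumpE r)
        rw [hl] at hfold
        rw [hfold, mapIdx_map_range]
        apply List.map_congr_left
        intro c _
        unfold bumpE
        generalize r.getD c 0 = v
        by_cases h0 : v = 0
        · subst h0; norm_num [List.modify]
        · by_cases h1 : v = 1
          · subst h1; norm_num [List.modify]
          · simp [h0, h1]
      rw [hstep, ih]
      apply List.map_congr_left
      intro c _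
      simp only [List.countP_cons, List.cons.injEq]
      generalize r.getD c 0 = v
      refine ⟨?_, ?_, trivial⟩ <;> by_cases h0 : v = 0 <;> by_cases h1 : v = 1 <;>
        simp [h0, h1] <;> ring


def rcFoldA (matrix : List (List Int)) : List (List Int) :=
  (List.range matrix.length).foldl
    (fun rc rn => rc.modify rn (fun e =>
      (List.range (matrix.headD []).length).foldl
        (fun e cn => bumpE (matrix.getD rn []) cn e) e))
    (List.replicate matrix.length [0, 0])

def ccFoldA (matrix : List (List Int)) : List (List Int) :=
  (List.range matrix.length).foldl
    (fun cc rn => innerCC (matrix.headD []).length (matrix.getD rn []) cc)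
    (List.replicate (matrix.headD []).length [0, 0])

lemma count_eq (matrix : List (List Int)) :
    count matrix = [rcFoldA matrix, ccFoldA matrix] := by
  have hin : ∀ (rn : Nat) (a b : List (List Int)),
      (List.range (matrix.headD []).length).foldl
        (fun (s : List (List Int) × List (List Int)) col_num =>
          let value := (matrix.getD rn []).getD col_num 0
          if value = 0 ∨ value = 1 then
            (s.1.modify rn (fun r => r.modify value.toNat (· + 1)),
             s.2.modify col_num (fun r => r.modify value.toNat (· + 1)))
          else s) (a, b)
      = (a.modify rn (fun e =>
            (List.range (matrix.headD []).length).foldl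
              (fun e cn => bumpE (matrix.getD rn []) cn e) e),
         innerCC (matrix.headD []).length (matrix.getD rn []) b) := by
    intro rn a b
    have hfn : (fun (s : List (List Int) × List (List Int)) col_num =>
          let value := (matrix.getD rn []).getD col_num 0
          if value = 0 ∨ value = 1 then
            (s.1.modify rn (fun r => r.modify value.toNat (· + 1)),
             s.2.modify col_num (fun r => r.modify value.toNat (· + 1)))
          else s)
        = (fun (s : List (List Int) × List (List Int)) col_num =>
            (s.1.modify rn (bumpE (matrix.getD rn []) col_num),
             s.2.modify col_num (bumpE (matrix.getD rn []) col_num))) := by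
      funext s cn
      unfold bumpE
      by_cases h : (matrix.getD rn []).getD cn 0 = 0 ∨ (matrix.getD rn []).getD cn 0 = 1
      · simp only [if_pos h]
      · simp only [if_neg h]
        rw [show (fun e : List Int => e) = (id : List Int → List Int) from rfl,
          List.modify_id, List.modify_id]
    rw [hfn]
    refine (foldl_pair (fun a cn => a.modify rn (bumpE (matrix.getD rn []) cn))
      (fun b cn => b.modify cn (bumpE (matrix.getD rn []) cn))
      (List.range (matrix.headD []).length) a b).trans ?_
    rw [foldl_modify_same]
    rfl
  have hout : ∀ (a b : List (List Int)),
      (List.range matrix.length).foldl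
        (fun (s : List (List Int) × List (List Int)) row_num =>
          (List.range (matrix.headD []).length).foldl
            (fun (s : List (List Int) × List (List Int)) col_num =>
              let value := (matrix.getD row_num []).getD col_num 0
              if value = 0 ∨ value = 1 then
                (s.1.modify row_num (fun r => r.modify value.toNat (· + 1)),
                 s.2.modify col_num (fun r => r.modify value.toNat (· + 1)))
              else s) s) (a, b)
      = ((List.range matrix.length).foldl
           (fun rc rn => rc.modify rn (fun e =>
             (List.range (matrix.headD []).length).foldl
               (fun e cn => bumpE (matrix.getD rn []) cn e) e)) a,
         (List.range matrix.length).foldl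
           (fun cc rn => innerCC (matrix.headD []).length (matrix.getD rn []) cc) b) := by
    intro a b
    have hfn2 : (fun (s : List (List Int) × List (List Int)) row_num =>
          (List.range (matrix.headD []).length).foldl
            (fun (s : List (List Int) × List (List Int)) col_num =>
              let value := (matrix.getD row_num []).getD col_num 0
              if value = 0 ∨ value = 1 then
                (s.1.modify row_num (fun r => r.modify value.toNat (· + 1)),
                 s.2.modify col_num (fun r => r.modify value.toNat (· + 1)))
              else s) s)
        = (fun (s : List (List Int) × List (List Int)) rn =>
            (s.1.modify rn (fun e =>
                (List.range (matrix.headD []).length).foldl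
                  (fun e cn => bumpE (matrix.getD rn []) cn e) e),
             innerCC (matrix.headD []).length (matrix.getD rn []) s.2)) := by
      funext s rn
      obtain ⟨a', b'⟩ := s
      exact hin rn a' b'
    rw [hfn2]
    exact foldl_pair
      (fun rc rn => rc.modify rn (fun e =>
        (List.range (matrix.headD []).length).foldl
          (fun e cn => bumpE (matrix.getD rn []) cn e) e))
      (fun cc rn => innerCC (matrix.headD []).length (matrix.getD rn []) cc)
      (List.range matrix.length) a b
  have h := hout (List.replicate matrix.length ([0, 0] : List Int))
    (List.replicate (matrix.headD []).length ([0, 0] : List Int))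
  exact congrArg (fun p : List (List Int) × List (List Int) => [p.1, p.2]) h

lemma rc_side (matrix : List (List Int))
    (hrows : ∀ row ∈ matrix, (matrix.headD []).length ≤ row.length) :
    rcFoldA matrix = matrix.map (fun row =>
      [((row.take (matrix.headD []).length).countP (fun v => v == 0) : Int),
       ((row.take (matrix.headD []).length).countP (fun v => v == 1) : Int)]) := by
  unfold rcFoldA
  have h1 := foldl_range_modify (List.replicate matrix.length ([0, 0] : List Int))
    (fun rn e => (List.range (matrix.headD []).length).foldl
      (fun e cn => bumpE (matrix.getD rn []) cn e) e)
  rw [List.length_replicate] at h1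
  rw [h1, mapIdx_replicate]
  have h2 : (List.range matrix.length).map (fun rn =>
        (List.range (matrix.headD []).length).foldl
          (fun e cn => bumpE (matrix.getD rn []) cn e) ([0, 0] : List Int))
      = (List.range matrix.length).map (fun rn =>
          [(((List.range (matrix.headD []).length).countP
              (fun c => (matrix.getD rn []).getD c 0 == 0)) : Int),
           (((List.range (matrix.headD []).length).countP
              (fun c => (matrix.getD rn []).getD c 0 == 1)) : Int)]) := by
    apply List.map_congr_left
    intro rn _
    rw [inner_entry]
    simp
  rw [h2, map_range_getD (fun r =>
    [(((List.range (matrix.headD []).length).countP (fun c => r.getD c 0 == 0)) : Int),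
     (((List.range (matrix.headD []).length).countP (fun c => r.getD c 0 == 1)) : Int)])
    ([] : List Int) matrix]
  apply List.map_congr_left
  intro row hrow
  rw [take_eq_map_range row _ (hrows row hrow), List.countP_map, List.countP_map]
  rfl

lemma cc_side (matrix : List (List Int)) :
    ccFoldA matrix = (List.range (matrix.headD []).length).map (fun c =>
      [((matrix.countP (fun row => row.getD c 0 == 0)) : Int),
       ((matrix.countP (fun row => row.getD c 0 == 1)) : Int)]) := by
  unfold ccFoldA
  rw [foldl_range_getD (fun cc r => innerCC (matrix.headD []).length r cc) ([] : List Int) matrix,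
    replicate_eq_map_range]
  have h := ccMain (matrix.headD []).length matrix (fun _ => 0) (fun _ => 0)
  rw [h]
  apply List.map_congr_left
  intro c _
  simp

theorem count_spec : Claim_equal_count := by
  intro matrix _ hpre
  obtain ⟨-, hrows⟩ := hpre
  unfold Spec_count
  rw [count_eq, rc_side matrix hrows, cc_side matrix]
  rfl
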